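-- pv_equiv track=rewrite | github.com/Kubaryt/AoC2024 | day/19/script1.py | check_combinations
-- ===== SOURCE A (Python) =====
-- def check_combinations(towels_and_combinations: dict[str, list[str]], is_part2: bool=False) -> int:
--     dp = {}
--     result = 0
--     for combination in towels_and_combinations["combinations"]:
--         is_valid = check(combination, dp, towels_and_combinations["available_towels"])
--         if is_valid >= 1 and not is_part2:
--             result += 1
--         if is_part2:
--             result += is_valid
--
--     return result
--
-- def check(combination: str, dp: dict[str, bool], available_towels: list[str]) -> (dict[str, int], int):
--     if dp.get(combination, None) is not None:
--         return dp[combination]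
--
--     if combination == "":
--         return 1
--
--     result = 0
--     for towel in available_towels:
--         if combination.startswith(towel):
--             result += check(combination[len(towel):], dp, available_towels)
--
--     dp[combination] = result
--     return result
-- ===== SOURCE B (Python) =====
-- def check_combinations(towels_and_combinations, is_part2=False):
--     # Bottom-up positional DP (no memo dict, no recursion): ways[j] = number of
--     # tilings of the suffix of the combination starting at absolute position i+j+1;
--     # we prepend ways for position i while walking i from the end to the front.
--     result = 0
--     for combination in towels_and_combinations["combinations"]:
--         towels = towels_and_combinations["available_towels"]
--         ways = [1]
--         for i in reversed(range(len(combination))):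
--             total = 0
--             for t in towels:
--                 if combination[i:i + len(t)] == t:
--                     total += ways[len(t) - 1]
--             ways.insert(0, total)
--         cnt = ways[0]
--         if is_part2:
--             result += cnt
--         elif cnt >= 1:
--             result += 1
--     return result
-- ===== Notes on version B (the rewrite author's own statement) =====
-- stated objective: alternative
-- what changed: Replaces A's top-down memoized recursion over suffix strings (shared dict cache keyed by strings) with a bottom-up positional DP per combination: a list of suffix arrangement counts built from the end of the string to the front, no recursion and no memo dict.
import Mathlib
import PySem

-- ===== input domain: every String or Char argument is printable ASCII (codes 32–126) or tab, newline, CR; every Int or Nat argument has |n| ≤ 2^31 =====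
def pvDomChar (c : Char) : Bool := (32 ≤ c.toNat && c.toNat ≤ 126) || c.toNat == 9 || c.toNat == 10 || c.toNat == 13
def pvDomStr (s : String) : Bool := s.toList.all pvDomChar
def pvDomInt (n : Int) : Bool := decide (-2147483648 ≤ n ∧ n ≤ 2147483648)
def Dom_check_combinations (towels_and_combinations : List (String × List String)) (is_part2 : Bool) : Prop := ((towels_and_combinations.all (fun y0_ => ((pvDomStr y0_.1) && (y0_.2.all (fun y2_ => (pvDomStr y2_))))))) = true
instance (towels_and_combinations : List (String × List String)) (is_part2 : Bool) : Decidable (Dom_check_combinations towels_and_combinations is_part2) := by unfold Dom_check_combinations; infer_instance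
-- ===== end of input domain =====

-- B replaces A's memoized suffix-string recursion by a bottom-up positional DP list per
-- combination (objective: alternative; not measured faster).

-- ===== PORT A =====
-- helper `check(combination, dp, available_towels)`: fuel = |combination| + 1 suffices under
-- Pre_ (every recursive call strictly shortens the suffix because towels are nonempty there);
-- fuel 0 returns a junk value only reachable outside Pre_.
def pvAchk (ts : List String) : Nat → String → PySem.Dict String Int → PySem.Dict String Int × Int
  | 0, _, dp => (dp, 0)
  | fuel+1, comb, dp =>
    match dp.get? comb with
    | some v => (dp, v)
    | none =>
      if comb == "" then (dp, 1)
      else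
        let st := ts.foldl (fun (st : PySem.Dict String Int × Int) t =>
          if PySem.Str.startswith comb t then
            let r := pvAchk ts fuel (PySem.Str.slice comb (some (PySem.Str.len t)) none) st.1
            (r.1, st.2 + r.2)
          else st) (dp, 0)
        (st.1.insert comb st.2, st.2)

def check_combinations (towels_and_combinations : List (String × List String)) (is_part2 : Bool) : Int :=
  let dict := PySem.Dict.mk towels_and_combinations
  ((((dict.get? "combinations").getD []).foldl (fun (st : PySem.Dict String Int × Int) comb =>
      let towels := (dict.get? "available_towels").getD []
      let r := pvAchk towels (comb.toList.length + 1) comb st.1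
      let res := if 1 ≤ r.2 ∧ is_part2 = false then st.2 + 1 else st.2
      (r.1, if is_part2 then res + r.2 else res)) (PySem.Dict.empty, 0))).2

-- ===== PORT B =====
-- bottom-up DP: ways (a list) holds the arrangement counts of the suffixes already processed,
-- walking the start position from the end of the combination to the front.
def pvCountWays (comb : String) (ts : List String) : Int :=
  let ways := ((PySem.List.pyRange 0 (PySem.Str.len comb) 1).reverse).foldl
    (fun ways i =>
      (ts.foldl (fun tot t =>
        if PySem.Str.slice comb (some i) (some (i + PySem.Str.len t)) == t
        then tot + (PySem.List.pyGet? ways (PySem.Str.len t - 1)).getD 0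
        else tot) 0) :: ways) [1]
  (PySem.List.pyGet? ways 0).getD 0

def check_combinations_alt (towels_and_combinations : List (String × List String)) (is_part2 : Bool) : Int :=
  (((PySem.Dict.mk towels_and_combinations).get? "combinations").getD []).foldl
    (fun res comb =>
      let towels := ((PySem.Dict.mk towels_and_combinations).get? "available_towels").getD []
      let cnt := pvCountWays comb towels
      if is_part2 then res + cnt else if 1 ≤ cnt then res + 1 else res) 0

-- ===== PRECONDITION & SPEC =====
-- Pre_ excludes exactly the inputs where A raises: a missing "combinations" key (KeyError); a
-- missing "available_towels" key when the combination list is nonempty (KeyError); and an empty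
-- towel together with a nonempty combination, on which A's suffix recursion never terminates
-- (RecursionError).
def Pre_check_combinations (towels_and_combinations : List (String × List String)) (is_part2 : Bool) : Prop :=
  ((PySem.Dict.mk towels_and_combinations).get? "combinations").isSome = true ∧
  (((PySem.Dict.mk towels_and_combinations).get? "combinations").getD [] = [] ∨
    (((PySem.Dict.mk towels_and_combinations).get? "available_towels").isSome = true ∧
      ((∀ t ∈ ((PySem.Dict.mk towels_and_combinations).get? "available_towels").getD [], t ≠ "") ∨
       (∀ c ∈ ((PySem.Dict.mk towels_and_combinations).get? "combinations").getD [], c = ""))))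
instance (towels_and_combinations : List (String × List String)) (is_part2 : Bool) : Decidable (Pre_check_combinations towels_and_combinations is_part2) := by unfold Pre_check_combinations; infer_instance

def pvWitness_check_combinations : (List (String × List String)) × Bool :=
  ([("combinations", ["brwrr", "bggr", "x"]), ("available_towels", ["r", "wr", "b", "g", "br"])], false)

def Spec_check_combinations (towels_and_combinations : List (String × List String)) (is_part2 : Bool) (out : Int) : Prop := out = check_combinations_alt towels_and_combinations is_part2
instance (towels_and_combinations : List (String × List String)) (is_part2 : Bool) (out : Int) : Decidable (Spec_check_combinations towels_and_combinations is_part2 out) := by unfold Spec_check_combinations; infer_instance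

-- ===== CLAIM (what is proved, stated in full; the proofs are below) =====
def Claim_equal_check_combinations : Prop := ∀ (towels_and_combinations : List (String × List String)) (is_part2 : Bool), Dom_check_combinations towels_and_combinations is_part2 → Pre_check_combinations towels_and_combinations is_part2 → Spec_check_combinations towels_and_combinations is_part2 (check_combinations towels_and_combinations is_part2)

-- ===== LEMMAS AND PROOFS =====

-- the common mathematical object: pvWays ts s lists the arrangement counts of the suffixes of s
-- (head = the count for s itself); pvF ts s is the arrangement count for s.
def pvWays (ts : List String) : List Char → List Int
  | [] => [1]
  | c :: rest =>
    (ts.foldl (fun tot t =>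
      if t.toList <+: (c :: rest) then tot + (pvWays ts rest).getD (t.toList.length - 1) 0 else tot) 0)
    :: pvWays ts rest

def pvF (ts : List String) (s : List Char) : Int := (pvWays ts s).headD 0

theorem pvWays_getD (ts : List String) (s : List Char) (k : Nat) (hk : k ≤ s.length) :
    (pvWays ts s).getD k 0 = pvF ts (s.drop k) := by
  induction s generalizing k with
  | nil => obtain rfl := Nat.le_zero.mp hk; rfl
  | cons c rest ih =>
    cases k with
    | zero => rfl
    | succ k => simpa [pvWays] using ih k (by simpa using hk)

theorem pvF_cons (ts : List String) (h : ∀ t ∈ ts, t ≠ "") (c : Char) (rest : List Char) :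
    pvF ts (c :: rest) =
      ts.foldl (fun r t => if t.toList <+: (c :: rest) then r + pvF ts ((c :: rest).drop t.toList.length) else r) 0 := by
  show (pvWays ts (c :: rest)).headD 0 = _
  rw [pvWays]
  simp only [List.headD_cons]
  apply PySem.List.foldl_congr_mem
  intro acc t ht
  by_cases hp : t.toList <+: (c :: rest)
  · have hne : t.toList ≠ [] := by
      intro h0
      exact h t ht (String.toList_inj.mp (by simp [h0]))
    have hpos : 0 < t.toList.length := List.length_pos_iff.mpr hne
    have hlen : t.toList.length ≤ rest.length + 1 := by simpa using hp.length_le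
    rw [pvWays_getD ts rest (t.toList.length - 1) (by omega)]
    obtain ⟨n, hn⟩ : ∃ n, t.toList.length = n + 1 := ⟨t.toList.length - 1, by omega⟩
    simp [hp, hn]
  · simp [hp]

-- ===== B side: the DP loop builds exactly pvWays =====
theorem pvStep_eq (ts : List String) (h : ∀ t ∈ ts, t ≠ "") (comb : String) (k : Nat)
    (hk : k < comb.toList.length) :
    (ts.foldl (fun tot t =>
        if PySem.Str.slice comb (some ((k : Nat) : Int)) (some (((k : Nat) : Int) + PySem.Str.len t)) == t
        then tot + (PySem.List.pyGet? (pvWays ts (comb.toList.drop (k+1))) (PySem.Str.len t - 1)).getD 0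
        else tot) 0) :: pvWays ts (comb.toList.drop (k+1))
      = pvWays ts (comb.toList.drop k) := by
  rw [List.drop_eq_getElem_cons hk, pvWays]
  congr 1
  apply PySem.List.foldl_congr_mem
  intro acc t ht
  have hne : t.toList ≠ [] := by
    intro h0
    exact h t ht (String.toList_inj.mp (by simp [h0]))
  have hpos : 0 < t.toList.length := List.length_pos_iff.mpr hne
  have hcond : (PySem.Str.slice comb (some ((k : Nat) : Int)) (some (((k : Nat) : Int) + PySem.Str.len t)) == t) = true
      ↔ t.toList <+: comb.toList[k] :: comb.toList.drop (k+1) := by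
    rw [beq_iff_eq, ← String.toList_inj, PySem.Str.toList_slice, PySem.Chars.slice_eq_listSlice,
      PySem.Str.len_eq, PySem.List.slice_natCast_add, ← List.drop_eq_getElem_cons hk]
    rw [List.prefix_iff_eq_take]
    exact eq_comm
  have hidx : PySem.Str.len t - 1 = ((t.toList.length - 1 : Nat) : Int) := by
    rw [PySem.Str.len_eq]; omega
  by_cases hp : t.toList <+: comb.toList[k] :: comb.toList.drop (k+1)
  · rw [if_pos (hcond.mpr hp), if_pos hp, hidx, PySem.List.pyGet?_natCast,
      ← List.getD_eq_getElem?_getD]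
  · rw [if_neg (fun hc => hp (hcond.mp hc)), if_neg hp]

theorem pvCountWays_eq (ts : List String) (h : ∀ t ∈ ts, t ≠ "") (comb : String) :
    pvCountWays comb ts = pvF ts comb.toList := by
  unfold pvCountWays
  rw [PySem.Str.len_eq, PySem.List.pyRange_one]
  have hm : ((comb.toList.length : Int) - 0).toNat = comb.toList.length := by omega
  rw [hm]
  simp only [zero_add, List.foldl_reverse, List.foldr_map]
  have key : ∀ j ≤ comb.toList.length,
      List.foldr (fun (k : Nat) (w : List Int) =>
        (ts.foldl (fun tot t =>
          if PySem.Str.slice comb (some ((k : Nat) : Int)) (some (((k : Nat) : Int) + PySem.Str.len t)) == t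
          then tot + (PySem.List.pyGet? w (PySem.Str.len t - 1)).getD 0
          else tot) 0) :: w) (pvWays ts (comb.toList.drop j)) (List.range j)
      = pvWays ts comb.toList := by
    intro j
    induction j with
    | zero => intro _; rfl
    | succ j ih =>
      intro hj
      rw [List.range_succ, List.foldr_append]
      simp only [List.foldr_cons, List.foldr_nil]
      rw [pvStep_eq ts h comb j (by omega)]
      exact ih (by omega)
  have init : pvWays ts (comb.toList.drop comb.toList.length) = [1] := by
    rw [List.drop_length]; rfl
  rw [← init]
  rw [key comb.toList.length (le_refl _)]
  cases hs : comb.toList <;> simp [pvF, pvWays, PySem.List.pyGet?, PySem.List.pyIdx?]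

theorem pvCountWays_empty (ts : List String) : pvCountWays "" ts = 1 := by
  simp [pvCountWays, PySem.Str.len_eq, PySem.List.pyGet?, PySem.List.pyIdx?]

-- ===== A side: the memoized recursion computes pvF and keeps the cache correct =====
def pvGood (ts : List String) (dp : PySem.Dict String Int) : Prop :=
  ∀ k v, dp.get? k = some v → v = pvF ts k.toList

theorem pvAchk_correct (ts : List String) (h : ∀ t ∈ ts, t ≠ "") :
    ∀ (fuel : Nat) (comb : String) (dp : PySem.Dict String Int),
      pvGood ts dp → comb.toList.length < fuel →
      (pvAchk ts fuel comb dp).2 = pvF ts comb.toList ∧ pvGood ts (pvAchk ts fuel comb dp).1 := by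
  intro fuel
  induction fuel with
  | zero => intro comb dp _ hlt; omega
  | succ fuel ih =>
    intro comb dp hg hlt
    rw [pvAchk]
    cases hc : dp.get? comb with
    | some v => exact ⟨(hg comb v hc).symm ▸ rfl, by simpa [hc] using hg⟩
    | none =>
      by_cases he : comb = ""
      · subst he
        simp only [beq_self_eq_true, if_true]
        exact ⟨rfl, hg⟩
      · have hbe : (comb == "") = false := by simp [he]
        rw [hbe]
        simp only [Bool.false_eq_true, if_false]
        -- inner loop
        have hnil : comb.toList ≠ [] := fun h0 => he (String.toList_inj.mp (by simp [h0]))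
        have hmpos : 0 < comb.toList.length := List.length_pos_iff.mpr hnil
        have inner : ∀ (l : List String), (∀ t ∈ l, t ∈ ts) → ∀ (st : PySem.Dict String Int × Int),
            pvGood ts st.1 →
            (l.foldl (fun (st : PySem.Dict String Int × Int) t =>
              if PySem.Str.startswith comb t then
                let r := pvAchk ts fuel (PySem.Str.slice comb (some (PySem.Str.len t)) none) st.1
                (r.1, st.2 + r.2)
              else st) st).2
              = l.foldl (fun a t => if t.toList <+: comb.toList then a + pvF ts (comb.toList.drop t.toList.length) else a) st.2
            ∧ pvGood ts (l.foldl (fun (st : PySem.Dict String Int × Int) t =>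
              if PySem.Str.startswith comb t then
                let r := pvAchk ts fuel (PySem.Str.slice comb (some (PySem.Str.len t)) none) st.1
                (r.1, st.2 + r.2)
              else st) st).1 := by
          intro l
          induction l with
          | nil => intro _ st hst; exact ⟨rfl, hst⟩
          | cons t l' ihl =>
            intro hmem st hst
            have ht : t ∈ ts := hmem t List.mem_cons_self
            have htne : t.toList ≠ [] := fun h0 => h t ht (String.toList_inj.mp (by simp [h0]))
            have htpos : 0 < t.toList.length := List.length_pos_iff.mpr htne
            simp only [List.foldl_cons]
            have hsw : PySem.Str.startswith comb t = true ↔ t.toList <+: comb.toList := by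
              rw [PySem.Str.startswith_eq]; exact PySem.Chars.startswith_iff _ _
            by_cases hp : t.toList <+: comb.toList
            · rw [if_pos (hsw.mpr hp), if_pos hp]
              have hslice : (PySem.Str.slice comb (some (PySem.Str.len t)) none).toList
                  = comb.toList.drop t.toList.length := by
                rw [PySem.Str.toList_slice, PySem.Chars.slice_eq_listSlice, PySem.Str.len_eq,
                  PySem.List.slice_from_natCast]
              have hplen : t.toList.length ≤ comb.toList.length := hp.length_le
              have hlt' : (PySem.Str.slice comb (some (PySem.Str.len t)) none).toList.length < fuel := by
                rw [hslice, List.length_drop]; omega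
              obtain ⟨hv, hgd⟩ := ih (PySem.Str.slice comb (some (PySem.Str.len t)) none) st.1 hst hlt'
              rw [hv, hslice]
              exact ihl (fun x hx => hmem x (List.mem_cons_of_mem t hx)) _ hgd
            · rw [if_neg (fun hc => hp (hsw.mp hc)), if_neg hp]
              exact ihl (fun x hx => hmem x (List.mem_cons_of_mem t hx)) _ hst
        obtain ⟨hv, hgd⟩ := inner ts (fun _ hx => hx) (dp, 0) hg
        constructor
        · simp only [hv]
          obtain ⟨c, rest, hcr⟩ : ∃ c rest, comb.toList = c :: rest := by
            cases hs : comb.toList with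
            | nil => exact absurd hs hnil
            | cons c rest => exact ⟨c, rest, rfl⟩
          rw [hcr, pvF_cons ts h c rest]
        · intro kk vv hk
          rw [PySem.Dict.get?_insert] at hk
          split at hk
          · next heq =>
            rw [heq, ← Option.some_inj.mp hk, hv]
            obtain ⟨c, rest, hcr⟩ : ∃ c rest, comb.toList = c :: rest := by
              cases hs : comb.toList with
              | nil => exact absurd hs hnil
              | cons c rest => exact ⟨c, rest, rfl⟩
            rw [hcr, pvF_cons ts h c rest]
          · exact hgd kk vv hk

theorem pvAchk_empty (ts : List String) (dp : PySem.Dict String Int) (hg : pvGood ts dp) :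
    (pvAchk ts 1 "" dp).2 = 1 ∧ pvGood ts (pvAchk ts 1 "" dp).1 := by
  rw [pvAchk]
  cases hc : dp.get? "" with
  | some v => exact ⟨(hg "" v hc).symm ▸ rfl, by simpa [hc] using hg⟩
  | none => exact ⟨rfl, hg⟩

theorem pvOuter (ts : List String) (p2 : Bool)
    (combos : List String) (dp : PySem.Dict String Int) (res : Int)
    (hg : pvGood ts dp) (hor : (∀ t ∈ ts, t ≠ "") ∨ (∀ c ∈ combos, c = "")) :
    (combos.foldl (fun (st : PySem.Dict String Int × Int) comb =>
        let r := pvAchk ts (comb.toList.length + 1) comb st.1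
        let res := if 1 ≤ r.2 ∧ p2 = false then st.2 + 1 else st.2
        (r.1, if p2 then res + r.2 else res)) (dp, res)).2
      = combos.foldl (fun res comb =>
          let cnt := pvCountWays comb ts
          if p2 then res + cnt else if 1 ≤ cnt then res + 1 else res) res := by
  induction combos generalizing dp res with
  | nil => rfl
  | cons c l ihc =>
    simp only [List.foldl_cons]
    have main : (pvAchk ts (c.toList.length + 1) c dp).2 = pvCountWays c ts
        ∧ pvGood ts (pvAchk ts (c.toList.length + 1) c dp).1 := by
      rcases hor with hok | hall
      · obtain ⟨hv, hgd⟩ := pvAchk_correct ts hok (c.toList.length + 1) c dp hg (by omega)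
        exact ⟨by rw [hv, pvCountWays_eq ts hok c], hgd⟩
      · obtain rfl := hall c List.mem_cons_self
        rw [show ("" : String).toList.length + 1 = 1 from rfl]
        obtain ⟨hv, hgd⟩ := pvAchk_empty ts dp hg
        exact ⟨by rw [hv, pvCountWays_empty], hgd⟩
    obtain ⟨hv, hgd⟩ := main
    have hor' : (∀ t ∈ ts, t ≠ "") ∨ (∀ c' ∈ l, c' = "") := by
      rcases hor with hok | hall
      · exact Or.inl hok
      · exact Or.inr (fun c' hc' => hall c' (List.mem_cons_of_mem c hc'))
    rw [ihc _ _ hgd hor']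
    congr 1
    rw [hv]
    cases p2 with
    | true => simp
    | false =>
      by_cases h1 : 1 ≤ pvCountWays c ts <;> simp [h1]

-- ===== VERDICT (by name: the statement is the Claim_ definition above) =====
theorem check_combinations_spec : Claim_equal_check_combinations := by
  intro d p2 _ hpre
  unfold Spec_check_combinations check_combinations check_combinations_alt
  obtain ⟨-, hrest⟩ := hpre
  have hg0 : pvGood (((PySem.Dict.mk d).get? "available_towels").getD []) PySem.Dict.empty := by
    intro k v hk
    rw [PySem.Dict.get?_empty] at hk
    exact absurd hk (Option.some_ne_none v).symm
  have hor : (∀ t ∈ ((PySem.Dict.mk d).get? "available_towels").getD [], t ≠ "")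
      ∨ (∀ c ∈ ((PySem.Dict.mk d).get? "combinations").getD [], c = "") := by
    rcases hrest with hnil | ⟨-, hok⟩
    · exact Or.inr (fun c hc => absurd (hnil ▸ hc) (List.not_mem_nil))
    · exact hok
  exact pvOuter _ p2 _ PySem.Dict.empty 0 hg0 hor
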